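-- pv_equiv track=rewrite | github.com/mbuhidar/retro_typein_tools | retrotype/retrotype.py | ahoy1_checksum
-- ===== SOURCE A (Python) =====
-- def ahoy1_checksum(byte_list):
--     '''
--     Function to create Ahoy checksums from passed in byte list to match the
--     codes printed in the magazine to check each line for typed in accuracy.
--     Covers Ahoy Bug Repellent version for Mar-Apr 1984 issues.
--     '''
--
--     next_value = 0
--
--     for char_val in byte_list:
--         # Detect spaces that are outside of quotes and ignore them, else
--         # execute primary checksum generation algorithm
--         if char_val == 32:
--             continue
--         next_value = char_val + next_value
--         next_value = next_value << 1
--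
--     xor_value = next_value
--     # get high nibble of xor_value
--     high_nib = (xor_value & 0xf0) >> 4
--     high_char_val = high_nib + 65  # 0x41
--     # get low nibble of xor_value
--     low_nib = xor_value & 0x0f
--     low_char_val = low_nib + 65  # 0x41
--     checksum = chr(high_char_val) + chr(low_char_val)
--     return checksum
-- ===== SOURCE B (Python) =====
-- def ahoy1_checksum(byte_list):
--     # Only the last 8 non-space bytes can affect the checksum byte: a byte kept
--     # i places before the end is weighted 2^(i+1), a multiple of 256 for i >= 8.
--     tail = [c for c in byte_list if c != 32][-8:]
--     m = len(tail)
--     low_byte = sum(c << (m - i) for i, c in enumerate(tail)) % 256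
--     return chr((low_byte >> 4) + 65) + chr((low_byte & 0x0f) + 65)
-- ===== Notes on version B (the rewrite author's own statement) =====
-- stated objective: faster
-- what changed: Replaces the Horner shift-accumulate loop over an ever-growing big integer by a closed-form sum over only the last 8 non-space bytes (earlier bytes get weights that are multiples of 256) reduced mod 256.
import Mathlib
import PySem

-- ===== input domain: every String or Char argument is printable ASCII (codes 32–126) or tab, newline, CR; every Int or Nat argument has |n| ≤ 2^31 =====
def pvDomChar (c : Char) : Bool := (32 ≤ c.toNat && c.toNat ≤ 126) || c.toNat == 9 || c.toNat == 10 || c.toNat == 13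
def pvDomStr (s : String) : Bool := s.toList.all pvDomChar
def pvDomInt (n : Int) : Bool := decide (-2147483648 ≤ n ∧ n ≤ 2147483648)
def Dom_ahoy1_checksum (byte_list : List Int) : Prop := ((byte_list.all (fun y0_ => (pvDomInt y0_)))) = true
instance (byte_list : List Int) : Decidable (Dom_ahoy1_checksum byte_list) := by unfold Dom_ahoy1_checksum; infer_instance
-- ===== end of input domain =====

-- B replaces A's Horner shift-accumulate loop over ever-growing integers by a
-- closed-form sum over only the last 8 non-space bytes (earlier weights are
-- multiples of 256) reduced mod 256 (objective: faster).


-- ===== PORT A =====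
-- chr(k) for k in 65..80 is ported as Char.ofNat k.toNat (exact: the nibble+65 value
-- is always in 65..80, a valid code point).
def ahoy1_checksum (byte_list : List Int) : String :=
  let next_value : Int :=
    byte_list.foldl (fun next_value char_val =>
      if char_val = 32 then next_value
      else (char_val + next_value) <<< (1 : Nat)) 0
  let xor_value := next_value
  let high_nib := (PySem.Int.band xor_value 0xf0) >>> (4 : Nat)
  let high_char_val := high_nib + 65
  let low_nib := PySem.Int.band xor_value 0x0f
  let low_char_val := low_nib + 65
  String.mk [Char.ofNat high_char_val.toNat, Char.ofNat low_char_val.toNat]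

-- ===== PORT B =====
def ahoy1_checksum_alt (byte_list : List Int) : String :=
  let tail := PySem.List.slice (byte_list.filter (fun c => c != 32)) (some (-8)) none
  let m : Int := tail.length
  -- c << (m - i): the shift amount m - i is always ≥ 1 (0 ≤ i < m), so .toNat is exact
  let low_byte : Int :=
    PySem.Int.mod (((PySem.List.enumerate tail).map
      (fun p => ((p.2 : Int) <<< (m - p.1).toNat))).sum : Int) 256
  String.mk [Char.ofNat ((low_byte >>> (4 : Nat)) + 65).toNat,
             Char.ofNat ((PySem.Int.band low_byte 15) + 65).toNat]

-- ===== PRECONDITION & SPEC =====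
def Spec_ahoy1_checksum (byte_list : List Int) (out : String) : Prop := out = ahoy1_checksum_alt byte_list
instance (byte_list : List Int) (out : String) : Decidable (Spec_ahoy1_checksum byte_list out) := by unfold Spec_ahoy1_checksum; infer_instance

-- ===== CLAIM (what is proved, stated in full; the proofs are below) =====
def Claim_equal_ahoy1_checksum : Prop := ∀ (byte_list : List Int), Dom_ahoy1_checksum byte_list → Spec_ahoy1_checksum byte_list (ahoy1_checksum byte_list)

-- ===== LEMMAS AND PROOFS =====

-- weighted sum S: S (c :: t) gives c the weight 2^(t.length+1)
def pvS : List Int → Int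
  | [] => 0
  | c :: t => c * 2 ^ (t.length + 1) + pvS t

-- B's enumerate-sum equals pvS, for any start index k with k + xs.length = n
theorem pvEnumSum (xs : List Int) : ∀ (k n : Int), k + xs.length = n →
    (((PySem.List.enumerate xs k).map (fun p => ((p.2 : Int) <<< (n - p.1).toNat))).sum : Int) = pvS xs := by
  induction xs with
  | nil => intro k n _; simp [PySem.List.enumerate, pvS]
  | cons c t ih =>
    intro k n h
    simp only [PySem.List.enumerate, List.map_cons, List.sum_cons, pvS]
    rw [ih (k + 1) n (by simp only [List.length_cons] at h; push_cast at h ⊢; omega)]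
    have hn : (n - k).toNat = t.length + 1 := by simp only [List.length_cons] at h; push_cast at h; omega
    rw [Int.shiftLeft_eq, hn]

-- A's Horner loop equals pvS of the filtered list plus the scaled accumulator
theorem pvHorner (l : List Int) : ∀ (acc : Int),
    (l.foldl (fun next_value char_val =>
      if char_val = 32 then next_value else (char_val + next_value) <<< (1 : Nat)) acc : Int)
    = pvS (l.filter (fun c => c != 32)) + acc * 2 ^ (l.filter (fun c => c != 32)).length := by
  induction l with
  | nil => intro acc; simp [pvS]
  | cons c t ih =>
    intro acc
    by_cases hc : c = 32
    · simp [hc, List.filter, ih]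
    · simp [hc, ih, pvS, pow_succ]
      rw [Int.shiftLeft_eq]
      ring

-- the low byte of pvS only depends on the last 8 elements (earlier weights are multiples of 256)
theorem pvSdrop (xs : List Int) : pvS xs % 256 = pvS (xs.drop (xs.length - 8)) % 256 := by
  induction xs with
  | nil => rfl
  | cons c t ih =>
    by_cases h : t.length ≤ 7
    · rw [Nat.sub_eq_zero_of_le (by simp; omega), List.drop_zero]
    · have h8 : t.length + 1 = 8 + (t.length - 7) := by omega
      have hdrop : (c :: t).length - 8 = (t.length - 8) + 1 := by simp; omega
      rw [hdrop, List.drop_succ_cons, ← ih]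
      show (c * 2 ^ (t.length + 1) + pvS t) % 256 = _
      rw [h8, pow_add]
      norm_num
      rw [show c * (256 * 2 ^ (t.length - 7)) + pvS t
            = pvS t + 256 * (c * 2 ^ (t.length - 7)) by ring]
      simp [Int.add_mul_emod_self_left]

-- bounded-value bit facts, checked exhaustively
set_option maxRecDepth 4096 in
theorem pvNatAndSmall : ∀ s, s < 256 → (s &&& 240 = s - s % 16 ∧ s &&& 15 = s % 16) := by decide

-- n &&& b depends only on n mod 256 when b < 256
theorem pvAndMod (n b : Nat) (hb : b < 256) : n &&& b = (n % 256) &&& b := by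
  have h : (256 : Nat) = 2 ^ 8 := by norm_num
  rw [h]
  apply Nat.eq_of_testBit_eq
  intro i
  simp only [Nat.testBit_and, Nat.testBit_mod_two_pow]
  by_cases hi : i < 8
  · simp [hi]
  · have hf : b.testBit i = false :=
      Nat.testBit_lt_two_pow (lt_of_lt_of_le (by omega : b < 2 ^ 8) (Nat.pow_le_pow_right (by omega) (by omega)))
    simp [hi, hf]

-- Python's x & 15 is x mod 16, for either sign of x
theorem pvBand15 (x : Int) : PySem.Int.band x 15 = x % 16 := by
  by_cases hx : 0 ≤ x
  · rw [show PySem.Int.band x 15 = ((x.toNat &&& 15 : Nat) : Int) by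
      simp [PySem.Int.band, hx]]
    rw [pvAndMod x.toNat 15 (by omega), (pvNatAndSmall _ (Nat.mod_lt _ (by omega))).2]
    omega
  · rw [show PySem.Int.band x 15 = ((15 - (15 &&& (-x - 1).toNat) : Nat) : Int) by
      simp [PySem.Int.band, hx]]
    rw [Nat.and_comm, pvAndMod (-x - 1).toNat 15 (by omega),
        (pvNatAndSmall _ (Nat.mod_lt _ (by omega))).2]
    omega

-- Python's x & 240 is x mod 256 minus x mod 16, for either sign of x
theorem pvBand240 (x : Int) : PySem.Int.band x 240 = x % 256 - x % 16 := by
  by_cases hx : 0 ≤ x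
  · rw [show PySem.Int.band x 240 = ((x.toNat &&& 240 : Nat) : Int) by
      simp [PySem.Int.band, hx]]
    rw [pvAndMod x.toNat 240 (by omega), (pvNatAndSmall _ (Nat.mod_lt _ (by omega))).1]
    omega
  · rw [show PySem.Int.band x 240 = ((240 - (240 &&& (-x - 1).toNat) : Nat) : Int) by
      simp [PySem.Int.band, hx]]
    rw [Nat.and_comm, pvAndMod (-x - 1).toNat 240 (by omega),
        (pvNatAndSmall _ (Nat.mod_lt _ (by omega))).1]
    omega

-- the tails of both programs produce the same two characters whenever the
-- accumulated values agree mod 256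
theorem pvFinal (nv t : Int) (h : nv % 256 = t % 256) :
    String.mk [Char.ofNat (((PySem.Int.band nv 240) >>> (4 : Nat)) + 65).toNat,
               Char.ofNat ((PySem.Int.band nv 15) + 65).toNat]
    = String.mk [Char.ofNat (((PySem.Int.mod t 256) >>> (4 : Nat)) + 65).toNat,
                 Char.ofNat ((PySem.Int.band (PySem.Int.mod t 256) 15) + 65).toNat] := by
  rw [pvBand240, pvBand15, PySem.Int.mod_eq_emod_of_pos (by omega), pvBand15,
      Int.shiftRight_eq_div_pow, Int.shiftRight_eq_div_pow]
  norm_num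
  have e1 : ((nv % 256 - nv % 16) / 16 + 65).toNat = (t % 256 / 16 + 65).toNat := by omega
  have e2 : (nv % 16 + 65).toNat = (t % 16 + 65).toNat := by omega
  rw [e1, e2]

-- ===== VERDICT (by name: the statement is the Claim_ definition above) =====
theorem ahoy1_checksum_spec : Claim_equal_ahoy1_checksum := by
  intro byte_list _
  have h1 : byte_list.foldl (fun (next_value : Int) char_val =>
      if char_val = 32 then next_value else (char_val + next_value) <<< (1 : Nat)) 0
      = pvS (byte_list.filter (fun c => c != 32)) := by
    simpa using pvHorner byte_list 0
  have htail : PySem.List.slice (byte_list.filter (fun c => c != 32)) (some (-8)) none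
      = (byte_list.filter (fun c => c != 32)).drop ((byte_list.filter (fun c => c != 32)).length - 8) :=
    PySem.List.slice_from_neg_ofNat _ 8 (by omega)
  have h2 := pvEnumSum ((byte_list.filter (fun c => c != 32)).drop ((byte_list.filter (fun c => c != 32)).length - 8)) 0
      (((byte_list.filter (fun c => c != 32)).drop ((byte_list.filter (fun c => c != 32)).length - 8)).length : Int) (by simp)
  show ahoy1_checksum byte_list = ahoy1_checksum_alt byte_list
  simp only [ahoy1_checksum, ahoy1_checksum_alt, h1, htail, h2]
  exact pvFinal _ _ (pvSdrop _)
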